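-- pv_equiv track=rewrite | github.com/reasonmii/ref_Python | inflearn_tomorrowIsCodingTest/04_offerSeat.py | solution
-- ===== SOURCE A (Python) =====
-- def solution(동물, 자리):
--     의자 = [] * 자리
--
--     answer = 0
--
--     for i in 동물:
--         if len(의자) < 3:
--             # 같은 종류의 동물이 이미 의자에 앉아 있을 때
--             if i in 의자:
--                 # 이미 같은 종이 있는 경우,
--                 # 해당 종을 기존 의자에서 없애서
--                 # 다시 맨 앞으로 넣어줌
--                 히트된동물 = 의자.pop(의자.index(i))
--                 의자.append(히트된동물)
--                 answer += 1
--             else: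
--                 # 같은 종이 없는 경우 바로 앉으면 됨
--                 의자.append(i)
--                 answer += 60
--         else:
--              # 같은 종류의 동물이 이미 의자에 앉아 있을 때
--             if i in 의자:
--                 # 가장 마지막 동물을 없애서 다시 앞으로 넣어줌
--                 히트된동물 = 의자.pop(의자.index(i))
--                 의자.append(히트된동물)
--                 answer += 1
--             else:
--                 # 최근에 Hit된 적이 없는 동물 제거 : 0번째
--                 의자.pop(0)
--                 의자.append(i)
--                 answer += 60
--
--     return f'{answer//60}분 {answer%60}초'
-- ===== SOURCE B (Python) =====
-- def solution(동물, 자리):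
--     # Stack-distance reformulation: no cache is simulated. An access is a miss iff, scanning
--     # backwards from it, 3 distinct other animals appear before (or instead of) its previous
--     # occurrence; the score is then the closed form len + 59*misses.
--     n = len(동물)
--     misses = 0
--     for i in range(n):
--         a = 동물[i]
--         seen = []
--         miss = True
--         for k in range(i - 1, -1, -1):
--             b = 동물[k]
--             if b == a:
--                 miss = False
--                 break
--             if b not in seen:
--                 seen.append(b)
--                 if len(seen) == 3:
--                     break
--         if miss:
--             misses += 1
--     answer = n + 59 * misses
--     return f'{answer // 60}분 {answer % 60}초'
-- ===== Notes on version B (the rewrite author's own statement) =====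
-- stated objective: alternative
-- what changed: B drops the cache simulation entirely and classifies each access independently by its LRU stack distance - a backward scan that declares a miss as soon as 3 distinct other animals are seen before (or instead of) the access's previous occurrence - then computes the score by the closed form len + 59*misses instead of accumulating 1s and 60s while maintaining a chair list.
import Mathlib
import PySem

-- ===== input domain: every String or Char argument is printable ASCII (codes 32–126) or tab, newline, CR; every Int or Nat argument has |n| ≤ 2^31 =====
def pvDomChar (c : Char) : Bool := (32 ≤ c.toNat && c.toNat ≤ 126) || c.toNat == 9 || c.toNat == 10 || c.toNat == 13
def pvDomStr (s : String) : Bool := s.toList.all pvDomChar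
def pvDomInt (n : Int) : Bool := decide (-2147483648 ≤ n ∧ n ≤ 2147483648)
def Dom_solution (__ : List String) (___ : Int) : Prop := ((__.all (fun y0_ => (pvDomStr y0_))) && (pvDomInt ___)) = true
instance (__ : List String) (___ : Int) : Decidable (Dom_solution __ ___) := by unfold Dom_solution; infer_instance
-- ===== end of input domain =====

-- B replaces A's LRU cache simulation by a per-access stack-distance classification (backward
-- scan: miss iff 3 distinct other animals appear before the previous occurrence, or there is
-- none) plus the closed-form score len + 59*misses (objective: alternative; not faster).


-- ===== PORT A =====
-- loop body of A: chairs list + running score; hit = pop at index then append (+1), miss = append, evicting chairs[0] when full (+60)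
def stepA (st : List String × Int) (i : String) : List String × Int :=
  if st.1.length < 3 then
    if st.1.contains i then
      match PySem.List.index? st.1 i with
      | some k =>
        match PySem.List.pop? st.1 (k : Int) with
        | some (x, rest) => (rest ++ [x], st.2 + 1)
        | none => st        -- unreachable: index? succeeded
      | none => st          -- unreachable: guarded by `i in 의자`
    else (st.1 ++ [i], st.2 + 60)
  else
    if st.1.contains i then
      match PySem.List.index? st.1 i with
      | some k =>
        match PySem.List.pop? st.1 (k : Int) with
        | some (x, rest) => (rest ++ [x], st.2 + 1)
        | none => st        -- unreachable
      | none => st          -- unreachable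
    else
      match PySem.List.pop? st.1 0 with
      | some (_, rest) => (rest ++ [i], st.2 + 60)
      | none => st          -- unreachable: length ≥ 3 here

def solution (__ : List String) (___ : Int) : String :=
  -- 의자 = [] * 자리 is just []
  let fin := __.foldl stepA ([], 0)
  PySem.Int.toStr (PySem.Int.floordiv fin.2 60) ++ "분 " ++ PySem.Int.toStr (PySem.Int.mod fin.2 60) ++ "초"

-- ===== PORT B =====
-- per-index miss test of B: scan backwards from i-1 (the Python for/break loop over
-- range(i-1,-1,-1), structural recursion on the countdown index list with the same `seen`
-- accumulator); false as soon as the previous occurrence shows up, true at 3 distinct others.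
-- every index handed to 동물[...] here lies in range(len(동물)), so pyGetD is exact for Python's 동물[k].
def scanB (l : List String) (a : String) : List Int → List String → Bool
  | [], _ => true
  | k :: rest, seen =>
    let b := PySem.List.pyGetD l k ""
    if b == a then false
    else if seen.contains b then scanB l a rest seen
    else if (seen ++ [b]).length == 3 then true
    else scanB l a rest (seen ++ [b])

def missB (l : List String) (i : Int) : Bool :=
  scanB l (PySem.List.pyGetD l i "") (PySem.List.pyRange (i - 1) (-1) (-1)) []

def solution_alt (__ : List String) (___ : Int) : String :=
  let n : Int := (__.length : Int)
  let misses : Int := (PySem.List.pyRange 0 n 1).foldl (fun m i => if missB __ i then m + 1 else m) 0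
  let answer : Int := n + 59 * misses
  PySem.Int.toStr (PySem.Int.floordiv answer 60) ++ "분 " ++ PySem.Int.toStr (PySem.Int.mod answer 60) ++ "초"

-- ===== PRECONDITION & SPEC =====
def Spec_solution (__ : List String) (___ : Int) (out : String) : Prop := out = solution_alt __ ___
instance (__ : List String) (___ : Int) (out : String) : Decidable (Spec_solution __ ___ out) := by unfold Spec_solution; infer_instance

-- ===== CLAIM (what is proved, stated in full; the proofs are below) =====
def Claim_equal_solution : Prop := ∀ (__ : List String) (___ : Int), Dom_solution __ ___ → Spec_solution __ ___ (solution __ ___)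

-- ===== LEMMAS AND PROOFS =====

-- recency list of the processed prefix: distinct elements ordered by last occurrence (oldest first)
def recStep (r : List String) (a : String) : List String := r.filter (fun x => x != a) ++ [a]
def recf (p : List String) : List String := p.foldl recStep []

-- A's chair list after prefix p: the (at most) 3 most recently used elements
def cacheOf (p : List String) : List String := (recf p).drop ((recf p).length - 3)

-- A's accumulated score over t, having processed prefix p
def scoreList : List String → List String → Int
  | _, [] => 0
  | p, a :: t => (if a ∈ cacheOf p then (1 : Int) else 60) + scoreList (p ++ [a]) t

theorem recf_snoc (p : List String) (a : String) :
    recf (p ++ [a]) = (recf p).filter (fun x => x != a) ++ [a] := by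
  simp [recf, recStep]

theorem recf_props (p : List String) :
    (recf p).Nodup ∧ (∀ x, x ∈ recf p ↔ x ∈ p) := by
  induction p using List.reverseRecOn with
  | nil => simp [recf]
  | append_singleton q a ih =>
    obtain ⟨hnd, hmem⟩ := ih
    rw [recf_snoc]
    constructor
    · refine List.Nodup.append (hnd.filter _) (List.nodup_singleton a) ?_
      intro x hx hy
      simp only [List.mem_filter, bne_iff_ne] at hx
      simp only [List.mem_singleton] at hy
      exact hx.2 hy
    · intro x
      simp [hmem x]
      tauto

-- the fold over the tail keeps `a`'s position structure: the part after `a` collects the tail's elements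
theorem foldl_recStep_mid : ∀ (s : List String) (a : String), a ∉ s → ∀ u v : List String,
    ∃ u' v', s.foldl recStep (u ++ a :: v) = u' ++ a :: v' ∧ (∀ x, x ∈ v' ↔ x ∈ v ∨ x ∈ s)
  | [], _, _, u, v => ⟨u, v, rfl, by simp⟩
  | b :: t, a, hs, u, v => by
    have hab : a ≠ b := fun h => hs (h ▸ List.mem_cons_self)
    have hat : a ∉ t := fun h => hs (List.mem_cons_of_mem _ h)
    have hstep : recStep (u ++ a :: v) b
        = (u.filter (fun x => x != b)) ++ a :: (v.filter (fun x => x != b) ++ [b]) := by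
      simp [recStep, List.filter_append, hab]
    obtain ⟨u', v', heq, hmem⟩ := foldl_recStep_mid t a hat
      (u.filter (fun x => x != b)) (v.filter (fun x => x != b) ++ [b])
    refine ⟨u', v', ?_, ?_⟩
    · simpa [hstep] using heq
    · intro x
      rw [hmem x]
      by_cases hxb : x = b <;> simp [hxb, List.mem_filter]

-- decomposition at the last occurrence of a: the recency list splits at a, its tail holding exactly s's elements
theorem recf_split (q : List String) (a : String) (s : List String) (hs : a ∉ s) :
    ∃ u v, recf (q ++ a :: s) = u ++ a :: v ∧ (∀ x, x ∈ v ↔ x ∈ s) := by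
  have hsplit : recf (q ++ a :: s) = s.foldl recStep (recf (q ++ [a])) := by
    have : q ++ a :: s = (q ++ [a]) ++ s := by simp
    rw [this, recf, recf, List.foldl_append]
  obtain ⟨u, v, heq, hmem⟩ := foldl_recStep_mid s a hs ((recf q).filter (fun x => x != a)) []
  refine ⟨u, v, ?_, fun x => by simpa using hmem x⟩
  rw [hsplit, recf_snoc]
  exact heq

-- membership in the last-3 suffix ≡ fewer than 3 strictly-more-recent elements
theorem mem_last3 (u v : List String) (a : String) (h : (u ++ a :: v).Nodup) :
    (a ∈ (u ++ a :: v).drop ((u ++ a :: v).length - 3)) ↔ v.length < 3 := by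
  have hav : a ∉ v := by
    have := (List.nodup_append.mp h).2.1
    exact (List.nodup_cons.mp this).1
  constructor
  · intro ha
    by_contra hv
    rw [Nat.not_lt] at hv
    have hre : u ++ a :: v = (u ++ [a]) ++ v := by simp
    rw [hre, List.drop_append] at ha
    have hnil : List.drop (((u ++ [a]) ++ v).length - 3) (u ++ [a]) = [] :=
      List.drop_eq_nil_of_le (by simp; omega)
    rw [hnil, List.nil_append] at ha
    exact hav (List.mem_of_mem_drop ha)
  · intro hv
    have hk : (u ++ a :: v).length - 3 ≤ u.length := by
      simp only [List.length_append, List.length_cons]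
      omega
    rw [List.drop_append_of_le_length hk]
    simp

-- same distinct elements, both duplicate-free: same length
theorem length_eq_of_nodup_mem (u v : List String) (hu : u.Nodup) (hv : v.Nodup)
    (h : ∀ x, x ∈ u ↔ x ∈ v) : u.length = v.length := by
  rw [← List.toFinset_card_of_nodup hu, ← List.toFinset_card_of_nodup hv]
  congr 1
  ext x
  simp [h x]

theorem stepA_cache (p : List String) (a : String) (ans : Int) :
    stepA (cacheOf p, ans) a = (cacheOf (p ++ [a]), ans + (if a ∈ cacheOf p then 1 else 60)) := by
  obtain ⟨hnd, _⟩ := recf_props p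
  have hrc : recf p = (recf p).take ((recf p).length - 3) ++ cacheOf p :=
    (List.take_append_drop _ _).symm
  have hwlen : ((recf p).take ((recf p).length - 3)).length = (recf p).length - 3 := by simp
  have hrec' : recf (p ++ [a]) = (recf p).filter (fun x => x != a) ++ [a] := recf_snoc p a
  have hfself : ∀ (t : List String), a ∉ t → t.filter (fun x => x != a) = t := fun t ht =>
    List.filter_eq_self.mpr (fun x hx => by simp; exact fun h => ht (h ▸ hx))
  by_cases hac : a ∈ cacheOf p
  · -- HIT: pop a at its index, append it, +1
    obtain ⟨k, hk⟩ := Option.isSome_iff_exists.mp ((PySem.List.index?_isSome_iff _ a).mpr hac)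
    obtain ⟨pre, suf, hdecomp, hklen, hapre⟩ :=
      (PySem.List.index?_eq_some_iff (cacheOf p) a k).mp hk
    have hcnd : (cacheOf p).Nodup := (List.drop_sublist _ _).nodup hnd
    have hasuf : a ∉ suf := by
      have h2 := hdecomp ▸ hcnd
      exact (List.nodup_cons.mp (List.nodup_append.mp h2).2.1).1
    have hklt : k < (pre ++ a :: suf).length := by subst hklen; simp
    have hpop := PySem.List.pop?_natCast (pre ++ a :: suf) k hklt
    have hgetk : (pre ++ a :: suf)[k]'hklt = a := by subst hklen; simp
    have herase : (pre ++ a :: suf).eraseIdx k = pre ++ suf := by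
      subst hklen
      simp [List.eraseIdx_append_of_length_le (le_refl pre.length)]
    rw [hgetk, herase] at hpop
    have hkd : PySem.List.index? (pre ++ a :: suf) a = some k := hdecomp ▸ hk
    have hA : stepA (cacheOf p, ans) a = (pre ++ suf ++ [a], ans + 1) := by
      rw [hdecomp]
      simp only [stepA, List.contains_iff_mem.mpr (hdecomp ▸ hac), if_true, hkd, hpop]
      split <;> rfl
    have hwa : a ∉ (recf p).take ((recf p).length - 3) := by
      intro hw
      have h2 := hrc ▸ hnd
      exact ((List.nodup_append.mp h2).2.2 a hw a hac) rfl
    have hmid : (a :: suf).filter (fun x => x != a) = suf := by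
      simp [hfself suf hasuf]
    have hr2 : recf p = (recf p).take ((recf p).length - 3) ++ (pre ++ a :: suf) := by
      rw [← hdecomp]; exact hrc
    have hfilter : (recf p).filter (fun x => x != a)
        = (recf p).take ((recf p).length - 3) ++ (pre ++ suf) := by
      conv_lhs => rw [hr2]
      rw [List.filter_append, List.filter_append, hfself _ hwa, hfself _ hapre, hmid]
    have hcache : cacheOf (p ++ [a]) = (pre ++ suf) ++ [a] := by
      unfold cacheOf
      rw [hrec', hfilter, List.append_assoc]
      have h1 := congrArg List.length hr2
      simp only [List.length_append, List.length_cons] at h1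
      have hD : ((recf p).take ((recf p).length - 3) ++ ((pre ++ suf) ++ [a])).length - 3
          = ((recf p).take ((recf p).length - 3)).length := by
        simp only [List.length_append, List.length_cons, List.length_nil]
        omega
      rw [hD, List.drop_left]
    rw [hA, hcache, if_pos hac]
  · -- MISS
    have hcont : (cacheOf p).contains a = false := by
      rw [← Bool.not_eq_true, List.contains_iff_mem]
      exact hac
    by_cases hlen : (cacheOf p).length < 3
    · -- room left: n < 3, cache = whole recency list, plain append
      have hclen : (cacheOf p).length = (recf p).length - ((recf p).length - 3) := by
        simp [cacheOf]
      have hn3 : (recf p).length < 3 := by omega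
      have hcr : cacheOf p = recf p := by
        unfold cacheOf
        rw [show (recf p).length - 3 = 0 from by omega]
        rfl
      have har : a ∉ recf p := hcr ▸ hac
      have hA : stepA (cacheOf p, ans) a = (cacheOf p ++ [a], ans + 60) := by
        simp [stepA, hlen]
        exact fun h => absurd h hac
      have hcache : cacheOf (p ++ [a]) = cacheOf p ++ [a] := by
        unfold cacheOf
        rw [hrec', hfself _ har]
        rw [show ((recf p) ++ [a]).length - 3 = 0 from by simp; omega]
        rw [List.drop_zero, show (recf p).length - 3 = 0 from by omega, List.drop_zero]
      rw [hA, hcache, if_neg hac]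
    · -- full: evict the least recently used (front), append, +60
      have hclen : (cacheOf p).length = (recf p).length - ((recf p).length - 3) := by
        simp [cacheOf]
      have hclen3 : (cacheOf p).length = 3 := by omega
      obtain ⟨c0, ct, hc⟩ : ∃ x t, cacheOf p = x :: t := by
        cases h : cacheOf p with
        | nil => rw [h] at hclen3; simp at hclen3
        | cons x t => exact ⟨x, t, rfl⟩
      have hct2 : ct.length = 2 := by
        rw [hc] at hclen3; simp at hclen3; omega
      have hlen' : ¬ (c0 :: ct).length < 3 := hc ▸ hlen
      have hcont' : (c0 :: ct).contains a = false := hc ▸ hcont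
      have hA : stepA (cacheOf p, ans) a = (ct ++ [a], ans + 60) := by
        rw [hc]
        have hnm : ¬(a = c0 ∨ a ∈ ct) := by
          rw [hc] at hac
          simpa using hac
        simp [stepA, PySem.List.pop?_zero_cons, hct2, hnm]
      have hfilter : (recf p).filter (fun x => x != a)
          = ((recf p).take ((recf p).length - 3)).filter (fun x => x != a) ++ cacheOf p := by
        conv_lhs => rw [hrc]
        rw [List.filter_append, hfself _ hac]
      have hcache : cacheOf (p ++ [a]) = ct ++ [a] := by
        unfold cacheOf
        rw [hrec', hfilter, hc, List.append_assoc]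
        have hD : (((recf p).take ((recf p).length - 3)).filter (fun x => x != a)
              ++ ((c0 :: ct) ++ [a])).length - 3
            = (((recf p).take ((recf p).length - 3)).filter (fun x => x != a)).length + 1 := by
          simp only [List.length_append, List.length_cons, List.length_nil, hct2]
          omega
        rw [hD, List.drop_append]
        rw [List.drop_eq_nil_of_le (Nat.le_succ _), List.nil_append]
        simp
      rw [hA, hcache, if_neg hac]

theorem foldl_stepA_score (t p : List String) (ans : Int) :
    (t.foldl stepA (cacheOf p, ans)).2 = ans + scoreList p t := by
  induction t generalizing p ans with
  | nil => simp [scoreList]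
  | cons a t ih =>
    simp only [List.foldl_cons, stepA_cache, scoreList, ih (p ++ [a])]
    ring

-- the element-wise form of the backward scan (indices replaced by the values they fetch)
def scanE (a : String) : List String → List String → Bool
  | [], _ => true
  | b :: rest, seen =>
    if b == a then false
    else if seen.contains b then scanE a rest seen
    else if (seen ++ [b]).length == 3 then true
    else scanE a rest (seen ++ [b])

theorem scanB_eq_scanE (l : List String) (a : String) :
    ∀ (ks : List Int) (seen : List String),
    scanB l a ks seen = scanE a (ks.map (fun k => PySem.List.pyGetD l k "")) seen := by
  intro ks
  induction ks with
  | nil => intro seen; rfl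
  | cons k rest ih =>
    intro seen
    simp only [scanB, scanE, List.map_cons]
    split_ifs <;> first | rfl | exact ih _

theorem scanE_notfound (a : String) : ∀ (s seen : List String), a ∉ s → scanE a s seen = true
  | [], _, _ => rfl
  | b :: s, seen, h => by
    have hba : (b == a) = false := by
      simp only [beq_eq_false_iff_ne, ne_eq]
      exact fun e => h (e ▸ List.mem_cons_self)
    have ht : a ∉ s := fun hs => h (List.mem_cons_of_mem _ hs)
    simp only [scanE, hba, Bool.false_eq_true, if_false]
    split_ifs <;> first | rfl | exact scanE_notfound a s _ ht

theorem len_update_mono : ∀ (s : List String) (X : PySem.Set String),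
    X.length ≤ (PySem.Set.update X s).length
  | [], _ => le_refl _
  | b :: s, X => by
    have h1 : X.length ≤ (PySem.Set.add X b).length := by
      simp only [PySem.Set.add]
      split_ifs <;> simp
    exact le_trans h1 (len_update_mono s (PySem.Set.add X b))

theorem scanE_found (a : String) : ∀ (s t seen : List String), a ∉ s → seen.length < 3 →
    scanE a (s ++ a :: t) seen = decide (3 ≤ (PySem.Set.update seen s).length)
  | [], t, seen, _, h3 => by
    simp only [List.nil_append, scanE, BEq.rfl, if_true, PySem.Set.update, List.foldl_nil]
    have : ¬ 3 ≤ seen.length := by omega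
    simp [this]
  | b :: s, t, seen, hs, h3 => by
    have hba : (b == a) = false := by
      simp only [beq_eq_false_iff_ne, ne_eq]
      exact fun e => hs (e ▸ List.mem_cons_self)
    have hts : a ∉ s := fun h => hs (List.mem_cons_of_mem _ h)
    have hupd : PySem.Set.update seen (b :: s) = PySem.Set.update (PySem.Set.add seen b) s := rfl
    simp only [List.cons_append, scanE, hba, Bool.false_eq_true, if_false]
    by_cases hc : seen.contains b
    · have hadd : PySem.Set.add seen b = seen := by
        simp [PySem.Set.add, List.contains_iff_mem.mp hc]
      rw [if_pos hc, scanE_found a s t seen hts h3, hupd, hadd]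
    · have hadd : PySem.Set.add seen b = seen ++ [b] := by
        have : b ∉ seen := fun hb => hc (List.contains_iff_mem.mpr hb)
        simp [PySem.Set.add, this]
      rw [if_neg hc]
      by_cases hl3 : (seen ++ [b]).length == 3
      · rw [if_pos hl3]
        have hmono := len_update_mono s (PySem.Set.add seen b)
        rw [hadd] at hmono
        have hge : 3 ≤ ((PySem.Set.add seen b).update s).length := by
          rw [hadd]
          simp only [List.length_append, List.length_cons, List.length_nil] at hmono
          simp only [beq_iff_eq, List.length_append, List.length_cons, List.length_nil] at hl3
          omega
        rw [hupd]
        simp [hge]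
      · rw [if_neg hl3]
        have hlt : (seen ++ [b]).length < 3 := by
          simp only [beq_iff_eq] at hl3
          simp only [List.length_append, List.length_cons, List.length_nil] at hl3 ⊢
          omega
        rw [scanE_found a s t (seen ++ [b]) hts hlt, hupd, hadd]

theorem missB_spec (l : List String) (i : Nat) (hi : i < l.length) :
    missB l (i : Int) = !(decide (l[i] ∈ cacheOf (l.take i))) := by
  have hget : PySem.List.pyGetD l (i : Int) "" = l[i] := by
    rw [PySem.List.pyGetD_natCast]
    exact List.getD_eq_getElem l "" hi
  have hrev : PySem.List.pyRange ((i : Int) - 1) (-1) (-1)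
      = (PySem.List.pyRange 0 (i : Int) 1).reverse := by
    rw [PySem.List.pyRange_neg_one_eq_reverse]
    norm_num
  have hmap : (PySem.List.pyRange 0 (i : Int) 1).map (fun k => PySem.List.pyGetD l k "")
      = l.take i := by
    have hlen : (((l.take i).length : Nat) : Int) = (i : Int) := by
      simp
      omega
    have h0 := PySem.List.map_pyGetD_pyRange_zero' (l.take i) ""
    rw [hlen] at h0
    rw [← h0]
    apply List.map_congr_left
    intro k hk
    obtain ⟨h1, h2⟩ := PySem.List.mem_pyRange_one.mp hk
    rw [PySem.List.pyGetD_of_nonneg _ _ h1, PySem.List.pyGetD_of_nonneg _ _ h1]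
    rw [List.getD_eq_getElem l "" (by omega), List.getD_eq_getElem (l.take i) "" (by simp; omega)]
    simp [List.getElem_take]
  have hscan : missB l (i : Int) = scanE l[i] (l.take i).reverse [] := by
    simp only [missB, hget, hrev]
    rw [scanB_eq_scanE, List.map_reverse, hmap]
  rw [hscan]
  by_cases hmem : l[i] ∈ l.take i
  · -- a previous occurrence exists: split the reversed prefix at the first (= most recent) one
    have hmemr : l[i] ∈ (l.take i).reverse := List.mem_reverse.mpr hmem
    obtain ⟨k, hk⟩ := Option.isSome_iff_exists.mp ((PySem.List.index?_isSome_iff _ _).mpr hmemr)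
    obtain ⟨pre, suf, hdec, hklen, hapre⟩ :=
      (PySem.List.index?_eq_some_iff ((l.take i).reverse) l[i] k).mp hk
    have hp : l.take i = suf.reverse ++ l[i] :: pre.reverse := by
      have h2 := congrArg List.reverse hdec
      simpa using h2
    rw [hdec, scanE_found l[i] pre suf [] hapre (by simp)]
    obtain ⟨u, v, hsplit, hv⟩ := recf_split suf.reverse l[i] pre.reverse (by simpa using hapre)
    rw [← hp] at hsplit
    have hnd' : (u ++ l[i] :: v).Nodup := hsplit ▸ (recf_props (l.take i)).1
    have hvnd : v.Nodup := by
      have := (List.nodup_append.mp hnd').2.1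
      exact (List.nodup_cons.mp this).2
    have hupdof : PySem.Set.update [] pre = PySem.Set.ofList pre := rfl
    have hvlen : v.length = (PySem.Set.update [] pre).length := by
      rw [hupdof]
      refine length_eq_of_nodup_mem v (PySem.Set.ofList pre) hvnd (PySem.Set.nodup_ofList pre) ?_
      intro x
      rw [hv x, PySem.Set.mem_ofList]
      exact List.mem_reverse
    have hcmem : (l[i] ∈ cacheOf (l.take i)) ↔ v.length < 3 := by
      unfold cacheOf
      rw [hsplit]
      exact mem_last3 u v l[i] hnd'
    by_cases h3 : v.length < 3
    · have hnot : ¬ 3 ≤ (PySem.Set.update [] pre).length := by omega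
      simp [hnot, hcmem.mpr h3]
    · have hyes : 3 ≤ (PySem.Set.update [] pre).length := by omega
      have hnm : l[i] ∉ cacheOf (l.take i) := fun hmm => h3 (hcmem.mp hmm)
      simp [hyes, hnm]
  · -- first occurrence
    rw [scanE_notfound l[i] ((l.take i).reverse) [] (by simpa using hmem)]
    have hnc : l[i] ∉ cacheOf (l.take i) := by
      intro hin
      exact hmem (((recf_props (l.take i)).2 _).mp (List.mem_of_mem_drop hin))
    simp [hnc]

theorem score_split (l : List String) (d i : Nat) (h : i + d = l.length) :
    scoreList (l.take i) (l.drop i)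
      = ((l.length - i : Nat) : Int)
        + 59 * ((PySem.List.pyRange (i : Int) (l.length : Int) 1).countP (fun j => missB l j)) := by
  induction d generalizing i with
  | zero =>
    have hi : i = l.length := by omega
    rw [hi, List.drop_length, PySem.List.pyRange_one_eq_nil (le_refl _)]
    simp [scoreList]
  | succ d ih =>
    have hil : i < l.length := by omega
    have hdrop : l.drop i = l[i] :: l.drop (i + 1) := List.drop_eq_getElem_cons hil
    have htake : l.take (i + 1) = l.take i ++ [l[i]] := by
      rw [List.take_add_one, List.getElem?_eq_getElem hil]
      rfl
    have hrange : PySem.List.pyRange (i : Int) (l.length : Int) 1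
        = (i : Int) :: PySem.List.pyRange ((i : Int) + 1) (l.length : Int) 1 :=
      PySem.List.pyRange_one_cons (by exact_mod_cast hil)
    have hih := ih (i + 1) (by omega)
    have hmiss := missB_spec l i hil
    rw [hdrop, scoreList, ← htake, hih, hrange]
    simp only [List.countP_cons]
    have hcast : ((i : Nat) : Int) + 1 = (((i + 1 : Nat)) : Int) := by push_cast; ring
    rw [hcast]
    by_cases hm : l[i] ∈ cacheOf (l.take i)
    · simp only [hm, if_true, hmiss, decide_true, Bool.not_true]
      push_cast
      omega
    · simp only [hm, if_false, hmiss, decide_false, Bool.not_false]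
      push_cast
      omega

-- ===== VERDICT (by name: the statement is the Claim_ definition above) =====
theorem solution_spec : Claim_equal_solution := by
  intro l z _
  unfold Spec_solution solution solution_alt
  have hA : (l.foldl stepA ([], 0)).2 = scoreList [] l := by
    have := foldl_stepA_score l [] 0
    simpa [cacheOf, recf] using this
  have hS := score_split l l.length 0 (by omega)
  rw [show (l.take 0) = [] from rfl, show (l.drop 0) = l from rfl] at hS
  have key : (l.foldl stepA ([], 0)).2
      = (l.length : Int) + 59 * ((PySem.List.pyRange 0 (l.length : Int) 1).foldl
          (fun m i => if missB l i then m + 1 else m) 0) := by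
    rw [PySem.List.foldl_if_add_one (fun j => missB l j)]
    rw [hA, hS]
    simp only [Nat.cast_zero, Nat.sub_zero]
    ring
  show PySem.Int.toStr (PySem.Int.floordiv (l.foldl stepA ([], 0)).2 60) ++ "분 "
        ++ PySem.Int.toStr (PySem.Int.mod (l.foldl stepA ([], 0)).2 60) ++ "초"
      = PySem.Int.toStr (PySem.Int.floordiv ((l.length : Int) + 59 * ((PySem.List.pyRange 0 (l.length : Int) 1).foldl
          (fun m i => if missB l i then m + 1 else m) 0)) 60) ++ "분 "
        ++ PySem.Int.toStr (PySem.Int.mod ((l.length : Int) + 59 * ((PySem.List.pyRange 0 (l.length : Int) 1).foldl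
          (fun m i => if missB l i then m + 1 else m) 0)) 60) ++ "초"
  rw [key]
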